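-- pv_equiv track=rewrite | github.com/Ove-Rom/EGEshk | Normeses/21-1-25/task 15 - 17528.py | f
-- ===== SOURCE A (Python) =====
-- def f(a1, a2):
--     P = [p for p in range(15, 41)]
--     Q = [q for q in range(21, 64)]
--     for x in range(1000):
--         f1 = (x in P) <= (((x in Q) and not (a1 <= x <= a2)) <= (not x in P))
--         if not f1:
--             return 0
--     else: return 1
-- ===== SOURCE B (Python) =====
-- def f(a1, a2):
--     # The predicate constrains exactly x in 21..40 (= P ∩ Q), requiring a1 <= x <= a2
--     # for each such x; the binding endpoints are 21 and 40.
--     return 1 if a1 <= 21 and a2 >= 40 else 0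
-- ===== Notes on version B (the rewrite author's own statement) =====
-- stated objective: simpler
-- what changed: Replaced the 1000-iteration loop over boolean-implication checks with the closed-form condition a1 <= 21 and a2 >= 40 derived from the predicate (it only constrains x in P∩Q = 21..40).
import Mathlib
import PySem

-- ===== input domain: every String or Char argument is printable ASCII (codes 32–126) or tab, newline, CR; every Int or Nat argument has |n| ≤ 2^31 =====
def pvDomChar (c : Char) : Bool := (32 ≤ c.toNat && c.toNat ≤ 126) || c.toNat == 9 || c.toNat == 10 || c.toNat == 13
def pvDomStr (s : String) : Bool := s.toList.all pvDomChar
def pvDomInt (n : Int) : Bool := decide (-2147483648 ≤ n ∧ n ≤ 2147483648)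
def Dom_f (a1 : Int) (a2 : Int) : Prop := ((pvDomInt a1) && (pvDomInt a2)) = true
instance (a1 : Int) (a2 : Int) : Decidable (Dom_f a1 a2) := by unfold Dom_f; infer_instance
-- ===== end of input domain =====

-- B replaces A's loop over range(1000) by the closed-form check a1 ≤ 21 ∧ 40 ≤ a2 (simpler).

-- ===== PORT A =====
-- Python's `b1 <= b2` on booleans
def fBle (b1 b2 : Bool) : Bool := !b1 || b2

-- the body of A's for-loop, returning 0 at the first x with ¬f1, else 1
def fLoop (a1 a2 : Int) (P Q : List Int) : List Int → Int
  | [] => 1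
  | x :: rest =>
      let f1 := fBle (P.contains x)
        (fBle ((Q.contains x) && !(decide (a1 ≤ x) && decide (x ≤ a2))) (!(P.contains x)))
      if !f1 then 0 else fLoop a1 a2 P Q rest

def f (a1 : Int) (a2 : Int) : Int :=
  let P := PySem.List.pyRange 15 41 1
  let Q := PySem.List.pyRange 21 64 1
  fLoop a1 a2 P Q (PySem.List.pyRange 0 1000 1)

-- ===== PORT B =====
def f_alt (a1 : Int) (a2 : Int) : Int :=
  if a1 ≤ 21 ∧ 40 ≤ a2 then 1 else 0

-- ===== PRECONDITION & SPEC =====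
def Spec_f (a1 : Int) (a2 : Int) (out : Int) : Prop := out = f_alt a1 a2
instance (a1 : Int) (a2 : Int) (out : Int) : Decidable (Spec_f a1 a2 out) := by unfold Spec_f; infer_instance

-- ===== CLAIM (what is proved, stated in full; the proofs are below) =====
def Claim_equal_f : Prop := ∀ (a1 : Int) (a2 : Int), Dom_f a1 a2 → Spec_f a1 a2 (f a1 a2)

-- ===== LEMMAS AND PROOFS =====

-- the per-x check, abstracted
def fCond (a1 a2 x : Int) (P Q : List Int) : Bool :=
  fBle (P.contains x)
    (fBle ((Q.contains x) && !(decide (a1 ≤ x) && decide (x ≤ a2))) (!(P.contains x)))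

lemma fLoop_eq_one (a1 a2 : Int) (P Q : List Int) (l : List Int)
    (h : ∀ x ∈ l, fCond a1 a2 x P Q = true) : fLoop a1 a2 P Q l = 1 := by
  induction l with
  | nil => rfl
  | cons x rest ih =>
      have hx := h x (List.mem_cons_self)
      simp only [fLoop, fCond] at hx ⊢
      rw [hx]
      simpa using ih (fun y hy => h y (List.mem_cons_of_mem _ hy))

lemma fLoop_eq_zero (a1 a2 : Int) (P Q : List Int) (l : List Int)
    (h : ∃ x ∈ l, fCond a1 a2 x P Q = false) : fLoop a1 a2 P Q l = 0 := by
  induction l with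
  | nil => simp at h
  | cons x rest ih =>
      obtain ⟨y, hy, hc⟩ := h
      simp only [fLoop, fCond] at *
      by_cases hx : fBle (P.contains x)
          (fBle ((Q.contains x) && !(decide (a1 ≤ x) && decide (x ≤ a2))) (!(P.contains x))) = true
      · rw [hx]
        rcases List.mem_cons.mp hy with rfl | hy'
        · rw [hx] at hc; cases hc
        · simpa using ih ⟨y, hy', hc⟩
      · simp only [Bool.not_eq_true] at hx
        rw [hx]
        rfl

lemma mem_contains_pyRange (a b x : Int) :
    (PySem.List.pyRange a b 1).contains x = true ↔ a ≤ x ∧ x < b := by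
  rw [List.contains_iff_mem, PySem.List.mem_pyRange_one]

lemma fCond_char (a1 a2 x : Int) :
    fCond a1 a2 x (PySem.List.pyRange 15 41 1) (PySem.List.pyRange 21 64 1) = true ↔
      ¬ (21 ≤ x ∧ x ≤ 40 ∧ ¬ (a1 ≤ x ∧ x ≤ a2)) := by
  simp only [fCond, fBle]
  by_cases hP : (PySem.List.pyRange 15 41 1).contains x = true <;>
  by_cases hQ : (PySem.List.pyRange 21 64 1).contains x = true <;>
    rw [mem_contains_pyRange] at hP hQ <;>
    simp_all <;> omega

theorem f_spec : Claim_equal_f := by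
  unfold Claim_equal_f
  intro a1 a2 _
  unfold Spec_f f f_alt
  by_cases h : a1 ≤ 21 ∧ 40 ≤ a2
  · rw [if_pos h]
    apply fLoop_eq_one
    intro x hx
    rw [PySem.List.mem_pyRange_one] at hx
    rw [fCond_char]
    omega
  · rw [if_neg h]
    apply fLoop_eq_zero
    by_cases h1 : a1 ≤ 21
    · refine ⟨40, ?_, ?_⟩
      · rw [PySem.List.mem_pyRange_one]; omega
      · rw [← Bool.not_eq_true, fCond_char]; push Not; omega
    · refine ⟨21, ?_, ?_⟩
      · rw [PySem.List.mem_pyRange_one]; omega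
      · rw [← Bool.not_eq_true, fCond_char]; push Not; omega
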